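-- pv_equiv track=rewrite | github.com/xincheng213618/scgd_general_wpf | Backend/marketplace/storage_browser.py | summarize_directory_items
-- ===== SOURCE A (Python) =====
-- from typing import Any, Callable
--
-- def summarize_directory_items(items: list[dict[str, Any]]) -> dict[str, int]:
--     file_count = sum(1 for item in items if not item["is_dir"])
--     directory_count = sum(1 for item in items if item["is_dir"])
--     total_size = sum(int(item.get("size", 0) or 0) for item in items if not item["is_dir"])
--     return {
--         "item_count": len(items),
--         "file_count": file_count,
--         "directory_count": directory_count,
--         "total_size": total_size,
--     }
-- ===== SOURCE B (Python) =====
-- def summarize_directory_items(items: list[dict[str, int]]) -> dict[str, int]: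
--     file_count = directory_count = total_size = 0
--     for item in items:
--         if item["is_dir"]:
--             directory_count += 1
--         else:
--             file_count += 1
--             total_size += int(item.get("size", 0) or 0)
--     return {
--         "item_count": len(items),
--         "file_count": file_count,
--         "directory_count": directory_count,
--         "total_size": total_size,
--     }
-- ===== Notes on version B (the rewrite author's own statement) =====
-- stated objective: simpler
-- what changed: Replaced A's three separate generator passes over items with a single loop maintaining three accumulators (file_count, directory_count, total_size).
import Mathlib
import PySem

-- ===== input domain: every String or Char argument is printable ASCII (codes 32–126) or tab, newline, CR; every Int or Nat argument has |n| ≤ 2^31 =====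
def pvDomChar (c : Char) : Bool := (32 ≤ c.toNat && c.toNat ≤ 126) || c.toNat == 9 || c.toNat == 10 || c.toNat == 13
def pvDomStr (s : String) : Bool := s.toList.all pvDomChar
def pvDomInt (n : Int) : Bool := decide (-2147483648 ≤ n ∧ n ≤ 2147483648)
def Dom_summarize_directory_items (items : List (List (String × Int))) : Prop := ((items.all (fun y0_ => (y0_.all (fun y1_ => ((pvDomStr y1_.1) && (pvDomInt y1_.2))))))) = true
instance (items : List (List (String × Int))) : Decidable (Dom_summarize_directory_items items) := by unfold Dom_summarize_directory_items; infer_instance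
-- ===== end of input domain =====

-- B replaces A's three separate passes over items by a single loop with three accumulators; same O(n) cost, one traversal.

-- dict lookup on an association list: first match (Python dict semantics under the type convention)
def pvLookup (it : List (String × Int)) (k : String) : Option Int :=
  (it.find? (fun p => p.1 == k)).map (·.2)

-- item["is_dir"] truthiness; under Pre_ the key is present, .getD 0 is never the deciding value there
def pvIsDir (it : List (String × Int)) : Bool := (pvLookup it "is_dir").getD 0 != 0

-- int(item.get("size", 0) or 0): values are already Int, so `x or 0` is x when x ≠ 0 else 0 — written out literally
def pvSize (it : List (String × Int)) : Int :=
  let s := (pvLookup it "size").getD 0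
  if s = 0 then 0 else s

-- ===== PORT A =====
def summarize_directory_items (items : List (List (String × Int))) : List (String × Int) :=
  let file_count : Int := items.foldl (fun a it => if pvIsDir it then a else a + 1) 0
  let directory_count : Int := items.foldl (fun a it => if pvIsDir it then a + 1 else a) 0
  let total_size : Int := items.foldl (fun a it => if pvIsDir it then a else a + pvSize it) 0
  [("item_count", (items.length : Int)), ("file_count", file_count),
   ("directory_count", directory_count), ("total_size", total_size)]

-- ===== PORT B =====
def summarize_directory_items_alt (items : List (List (String × Int))) : List (String × Int) :=
  let st : Int × Int × Int := items.foldl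
    (fun acc it =>
      if pvIsDir it then (acc.1, acc.2.1 + 1, acc.2.2)
      else (acc.1 + 1, acc.2.1, acc.2.2 + pvSize it))
    (0, 0, 0)
  [("item_count", (items.length : Int)), ("file_count", st.1),
   ("directory_count", st.2.1), ("total_size", st.2.2)]

-- ===== PRECONDITION & SPEC =====
-- Pre_ excludes exactly the inputs where some item lacks an "is_dir" key: Python A raises KeyError there (B raises too).
def Pre_summarize_directory_items (items : List (List (String × Int))) : Prop :=
  (items.all (fun it => (it.find? (fun p => p.1 == "is_dir")).isSome)) = true
instance (items : List (List (String × Int))) : Decidable (Pre_summarize_directory_items items) := by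
  unfold Pre_summarize_directory_items; infer_instance

def pvWitness_summarize_directory_items : (List (List (String × Int))) :=
  [[("is_dir", 1)], [("is_dir", 0), ("size", 7)]]

def Spec_summarize_directory_items (items : List (List (String × Int))) (out : List (String × Int)) : Prop := out = summarize_directory_items_alt items
instance (items : List (List (String × Int))) (out : List (String × Int)) : Decidable (Spec_summarize_directory_items items out) := by unfold Spec_summarize_directory_items; infer_instance

-- ===== CLAIM (what is proved, stated in full; the proofs are below) =====
def Claim_equal_summarize_directory_items : Prop := ∀ (items : List (List (String × Int))), Dom_summarize_directory_items items → Pre_summarize_directory_items items → Spec_summarize_directory_items items (summarize_directory_items items)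

-- ===== LEMMAS AND PROOFS =====
-- B's single fold over a triple computes exactly A's three folds, componentwise, for any initial state.
theorem pv_fold_triple (items : List (List (String × Int))) (fc dc ts : Int) :
    items.foldl
      (fun (acc : Int × Int × Int) it =>
        if pvIsDir it then (acc.1, acc.2.1 + 1, acc.2.2)
        else (acc.1 + 1, acc.2.1, acc.2.2 + pvSize it))
      (fc, dc, ts)
    = (items.foldl (fun a it => if pvIsDir it then a else a + 1) fc,
       items.foldl (fun a it => if pvIsDir it then a + 1 else a) dc,
       items.foldl (fun a it => if pvIsDir it then a else a + pvSize it) ts) := by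
  induction items generalizing fc dc ts with
  | nil => rfl
  | cons it rest ih =>
      by_cases h : pvIsDir it = true <;> simp [List.foldl, h, ih]

-- ===== VERDICT (by name: the statement is the Claim_ definition above) =====
theorem summarize_directory_items_spec : Claim_equal_summarize_directory_items := by
  intro items _ _
  unfold Spec_summarize_directory_items summarize_directory_items summarize_directory_items_alt
  rw [pv_fold_triple]
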